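-- pv_equiv track=rewrite | github.com/radical-cybertools/radical.pilot | docs/architecture/env_isolation/00_env_isolation_utils.py | env_diff
-- ===== SOURCE A (Python) =====
-- def env_diff(env_1, env_2):
--
--     # This method serves debug purposes: it compares to environments and returns
--     # those elements which appear in only either one or the other env, and which
--     # changed from one env to another.
--
--     only_1  = dict()
--     only_2  = dict()
--     changed = dict()
--
--     keys_1 = sorted(env_1.keys())
--     keys_2 = sorted(env_2.keys())
--
--     for k in keys_1:
--         v = env_1[k]
--         if   k not in env_2: only_1[k]  = v
--         elif v != env_2[k] : changed[k] = [v, env_2[k]]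
--
--     for k in keys_2:
--         v = env_2[k]
--         if   k not in env_1: only_2[k]  = v
--         elif v != env_1[k] : changed[k] = [env_1[k], v]
--
--     return only_1, only_2, changed
-- ===== SOURCE B (Python) =====
-- def env_diff(env_1, env_2):
--     # merge-scan version: sort both item lists by key once, then classify every
--     # key in a single two-pointer sweep over the two sorted sequences.
--     items_1 = sorted(env_1.items(), key=lambda kv: kv[0])
--     items_2 = sorted(env_2.items(), key=lambda kv: kv[0])
--     only_1, only_2, changed = {}, {}, {}
--     i, j = 0, 0
--     while i < len(items_1) and j < len(items_2):
--         k1, v1 = items_1[i]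
--         k2, v2 = items_2[j]
--         if k1 < k2:
--             only_1[k1] = v1
--             i += 1
--         elif k2 < k1:
--             only_2[k2] = v2
--             j += 1
--         else:
--             if v1 != v2:
--                 changed[k1] = [v1, v2]
--             i += 1
--             j += 1
--     for k, v in items_1[i:]:
--         only_1[k] = v
--     for k, v in items_2[j:]:
--         only_2[k] = v
--     return only_1, only_2, changed
-- ===== Notes on version B (the rewrite author's own statement) =====
-- stated objective: alternative
-- what changed: replaces A's two per-key membership-test loops over the other dict with a single two-pointer merge sweep of the two key-sorted item lists that classifies each key once
import Mathlib
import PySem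

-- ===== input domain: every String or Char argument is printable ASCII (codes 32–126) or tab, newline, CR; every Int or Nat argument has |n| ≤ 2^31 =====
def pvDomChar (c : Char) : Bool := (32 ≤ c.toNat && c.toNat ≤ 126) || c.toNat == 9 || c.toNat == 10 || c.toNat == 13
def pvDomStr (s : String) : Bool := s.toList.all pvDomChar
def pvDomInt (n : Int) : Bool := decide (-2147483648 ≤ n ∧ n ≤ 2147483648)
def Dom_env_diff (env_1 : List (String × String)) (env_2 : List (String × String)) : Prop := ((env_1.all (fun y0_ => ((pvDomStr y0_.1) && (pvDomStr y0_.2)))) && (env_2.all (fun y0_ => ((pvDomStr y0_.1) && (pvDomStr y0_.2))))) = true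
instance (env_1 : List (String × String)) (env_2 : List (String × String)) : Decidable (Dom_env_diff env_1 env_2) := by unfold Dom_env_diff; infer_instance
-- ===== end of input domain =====

-- B replaces A's two membership-branching scans over the other dict with a single
-- two-pointer merge sweep of the two key-sorted item lists; same cost, different algorithm.

-- ===== PORT A =====
-- loop body of A's first 'for k in keys_1' loop (state = (only_1, changed))
def envStep1 (d1 d2 : PySem.Dict String String)
    (s : PySem.Dict String String × PySem.Dict String (List String)) (k : String) :
    PySem.Dict String String × PySem.Dict String (List String) :=
  let v := d1.getD k ""
  if d2.contains k = false then (s.1.insert k v, s.2)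
  else if v ≠ d2.getD k "" then (s.1, s.2.insert k [v, d2.getD k ""])
  else s

-- loop body of A's second 'for k in keys_2' loop (state = (only_2, changed))
def envStep2 (d1 d2 : PySem.Dict String String)
    (s : PySem.Dict String String × PySem.Dict String (List String)) (k : String) :
    PySem.Dict String String × PySem.Dict String (List String) :=
  let v := d2.getD k ""
  if d1.contains k = false then (s.1.insert k v, s.2)
  else if v ≠ d1.getD k "" then (s.1, s.2.insert k [d1.getD k "", v])
  else s

def env_diff (env_1 : List (String × String)) (env_2 : List (String × String)) :
    (List (String × String)) × (List (String × String)) × (List (String × List String)) :=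
  let d1 := PySem.Dict.ofList env_1
  let d2 := PySem.Dict.ofList env_2
  let keys_1 := PySem.List.sorted d1.keys (fun k => k) false
  let keys_2 := PySem.List.sorted d2.keys (fun k => k) false
  let r1 := keys_1.foldl (envStep1 d1 d2) (PySem.Dict.empty, PySem.Dict.empty)
  let r2 := keys_2.foldl (envStep2 d1 d2) (PySem.Dict.empty, r1.2)
  (r1.1.items, r2.1.items, r2.2.items)

-- ===== PORT B =====
-- B's while-loop over the two sorted item lists, transcribed as structural
-- recursion on the two lists (the state only ever appends fresh keys, so the
-- three result dicts are their item lists built in sweep order; the tails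
-- copied by B's trailing for-loops are the base cases).
def envMerge : List (String × String) → List (String × String) →
    (List (String × String)) × (List (String × String)) × (List (String × List String))
  | [], ys => ([], ys, [])
  | x :: xs, [] => (x :: xs, [], [])
  | (k1, v1) :: xs, (k2, v2) :: ys =>
    if k1 < k2 then
      let r := envMerge xs ((k2, v2) :: ys)
      ((k1, v1) :: r.1, r.2.1, r.2.2)
    else if k2 < k1 then
      let r := envMerge ((k1, v1) :: xs) ys
      (r.1, (k2, v2) :: r.2.1, r.2.2)
    else
      if v1 ≠ v2 then
        let r := envMerge xs ys
        (r.1, r.2.1, (k1, [v1, v2]) :: r.2.2)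
      else envMerge xs ys
  termination_by xs ys => xs.length + ys.length
  decreasing_by all_goals (simp; try omega)

def env_diff_alt (env_1 : List (String × String)) (env_2 : List (String × String)) :
    (List (String × String)) × (List (String × String)) × (List (String × List String)) :=
  let items_1 := PySem.List.sorted (PySem.Dict.ofList env_1).items (fun kv => kv.1) false
  let items_2 := PySem.List.sorted (PySem.Dict.ofList env_2).items (fun kv => kv.1) false
  envMerge items_1 items_2

-- ===== PRECONDITION & SPEC =====
def Spec_env_diff (env_1 : List (String × String)) (env_2 : List (String × String)) (out : (List (String × String)) × (List (String × String)) × (List (String × List String))) : Prop := out = env_diff_alt env_1 env_2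
instance (env_1 : List (String × String)) (env_2 : List (String × String)) (out : (List (String × String)) × (List (String × String)) × (List (String × List String))) : Decidable (Spec_env_diff env_1 env_2 out) := by unfold Spec_env_diff; infer_instance

-- ===== CLAIM (what is proved, stated in full; the proofs are below) =====
def Claim_equal_env_diff : Prop := ∀ (env_1 : List (String × String)) (env_2 : List (String × String)), Dom_env_diff env_1 env_2 → Spec_env_diff env_1 env_2 (env_diff env_1 env_2)

-- ===== LEMMAS AND PROOFS =====

-- inserting a binding a dict already holds changes nothing
theorem insert_same_of_get? {κ ν : Type} [BEq κ] [LawfulBEq κ] (d : PySem.Dict κ ν)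
    {k : κ} {v : ν} (hnd : d.keys.Nodup) (h : d.get? k = some v) : d.insert k v = d := by
  apply PySem.Dict.ext
  have hc : d.contains k = true := by
    rw [PySem.Dict.contains_eq_isSome_get?, h]; rfl
  rw [PySem.Dict.items_insert_of_contains d v hc]
  conv_rhs => rw [← List.map_id d.items]
  apply List.map_congr_left
  rintro ⟨a, b⟩ hp
  by_cases hk : a = k
  · subst hk
    have hv2 : d.get? a = some b := PySem.Dict.get?_of_mem_items d hp hnd
    rw [h] at hv2
    simp [Option.some.injEq] at hv2
    simp [hv2]
  · simp [hk]

-- characterisation of A's first loop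
theorem loop1_char (d1 d2 : PySem.Dict String String) :
    ∀ (ks : List String) (o : PySem.Dict String String) (c : PySem.Dict String (List String)),
      ks.Nodup → (∀ k ∈ ks, o.contains k = false) → (∀ k ∈ ks, c.contains k = false) →
      (ks.foldl (envStep1 d1 d2) (o, c)).1.items
          = o.items ++ (ks.filter (fun k => !d2.contains k)).map (fun k => (k, d1.getD k ""))
        ∧ (ks.foldl (envStep1 d1 d2) (o, c)).2.items
          = c.items ++ (ks.filter (fun k => d2.contains k && !(d1.getD k "" == d2.getD k ""))).map
              (fun k => (k, [d1.getD k "", d2.getD k ""])) := by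
  intro ks
  induction ks with
  | nil => intro o c _ _ _; simp
  | cons k t ih =>
    intro o c hnd ho hc
    have hndt : t.Nodup := hnd.of_cons
    have hkt : k ∉ t := (List.nodup_cons.mp hnd).1
    have hot : ∀ k' ∈ t, o.contains k' = false := fun k' hk' => ho k' (List.mem_cons_of_mem _ hk')
    have hct : ∀ k' ∈ t, c.contains k' = false := fun k' hk' => hc k' (List.mem_cons_of_mem _ hk')
    simp only [List.foldl_cons]
    by_cases h2 : d2.contains k = true
    · by_cases hv : d1.getD k "" = d2.getD k ""
      · have hstep : envStep1 d1 d2 (o, c) k = (o, c) := by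
          simp [envStep1, h2, hv]
        rw [hstep]
        have := ih o c hndt hot hct
        simp [h2, hv, this.1, this.2]
      · have hstep : envStep1 d1 d2 (o, c) k
            = (o, c.insert k [d1.getD k "", d2.getD k ""]) := by
          simp [envStep1, h2, hv]
        rw [hstep]
        have hct' : ∀ k' ∈ t, (c.insert k [d1.getD k "", d2.getD k ""]).contains k' = false := by
          intro k' hk'
          rw [PySem.Dict.contains_insert]
          have : k' ≠ k := fun e => hkt (e ▸ hk')
          simp [this, hct k' hk']
        have := ih o (c.insert k [d1.getD k "", d2.getD k ""]) hndt hot hct'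
        rw [this.2] at *
        refine ⟨this.1.trans ?_, ?_⟩
        · simp [h2]
        · rw [PySem.Dict.items_insert_of_not_contains c _ (hc k (List.mem_cons_self))]
          simp [h2, hv]
    · have h2f : d2.contains k = false := by simpa using h2
      have hstep : envStep1 d1 d2 (o, c) k = (o.insert k (d1.getD k ""), c) := by
        simp [envStep1, h2f]
      rw [hstep]
      have hot' : ∀ k' ∈ t, (o.insert k (d1.getD k "")).contains k' = false := by
        intro k' hk'
        rw [PySem.Dict.contains_insert]
        have : k' ≠ k := fun e => hkt (e ▸ hk')
        simp [this, hot k' hk']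
      have := ih (o.insert k (d1.getD k "")) c hndt hot' hct
      refine ⟨this.1.trans ?_, this.2.trans ?_⟩
      · rw [PySem.Dict.items_insert_of_not_contains o _ (ho k (List.mem_cons_self))]
        simp [h2f]
      · simp [h2f]

-- characterisation of A's second loop: only_2 accumulates, changed is untouched
theorem loop2_char (d1 d2 : PySem.Dict String String) :
    ∀ (ks : List String) (o : PySem.Dict String String) (c : PySem.Dict String (List String)),
      ks.Nodup → (∀ k ∈ ks, o.contains k = false) → c.keys.Nodup →
      (∀ k ∈ ks, d1.contains k = true → d2.getD k "" ≠ d1.getD k "" →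
        c.get? k = some [d1.getD k "", d2.getD k ""]) →
      (ks.foldl (envStep2 d1 d2) (o, c)).1.items
          = o.items ++ (ks.filter (fun k => !d1.contains k)).map (fun k => (k, d2.getD k ""))
        ∧ (ks.foldl (envStep2 d1 d2) (o, c)).2 = c := by
  intro ks
  induction ks with
  | nil => intro o c _ _ _ _; simp
  | cons k t ih =>
    intro o c hnd ho hcnd hcg
    have hndt : t.Nodup := hnd.of_cons
    have hkt : k ∉ t := (List.nodup_cons.mp hnd).1
    have hot : ∀ k' ∈ t, o.contains k' = false := fun k' hk' => ho k' (List.mem_cons_of_mem _ hk')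
    have hcgt : ∀ k' ∈ t, d1.contains k' = true → d2.getD k' "" ≠ d1.getD k' "" →
        c.get? k' = some [d1.getD k' "", d2.getD k' ""] :=
      fun k' hk' => hcg k' (List.mem_cons_of_mem _ hk')
    simp only [List.foldl_cons]
    by_cases h1 : d1.contains k = true
    · by_cases hv : d2.getD k "" = d1.getD k ""
      · have hstep : envStep2 d1 d2 (o, c) k = (o, c) := by
          simp [envStep2, h1, hv]
        rw [hstep]
        have := ih o c hndt hot hcnd hcgt
        simp [h1, this.1, this.2]
      · have hins : c.insert k [d1.getD k "", d2.getD k ""] = c :=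
          insert_same_of_get? c hcnd (hcg k List.mem_cons_self h1 hv)
        have hstep : envStep2 d1 d2 (o, c) k = (o, c) := by
          simp only [envStep2, h1]
          simp [hins]
        rw [hstep]
        have := ih o c hndt hot hcnd hcgt
        simp [h1, this.1, this.2]
    · have h1f : d1.contains k = false := by simpa using h1
      have hstep : envStep2 d1 d2 (o, c) k = (o.insert k (d2.getD k ""), c) := by
        simp [envStep2, h1f]
      rw [hstep]
      have hot' : ∀ k' ∈ t, (o.insert k (d2.getD k "")).contains k' = false := by
        intro k' hk'
        rw [PySem.Dict.contains_insert]
        have : k' ≠ k := fun e => hkt (e ▸ hk')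
        simp [this, hot k' hk']
      have := ih (o.insert k (d2.getD k "")) c hndt hot' hcnd hcgt
      refine ⟨this.1.trans ?_, this.2⟩
      rw [PySem.Dict.items_insert_of_not_contains o _ (ho k (List.mem_cons_self))]
      simp [h1f]

-- the two-pointer merge on strictly key-increasing lists of bindings computes
-- exactly the three filtered projections A's loops produce
theorem merge_char (g1 g2 : String → String) :
    ∀ (l1 l2 : List String), l1.Pairwise (fun a b => a < b) → l2.Pairwise (fun a b => a < b) →
      envMerge (l1.map (fun k => (k, g1 k))) (l2.map (fun k => (k, g2 k)))
        = ( (l1.filter (fun k => !l2.contains k)).map (fun k => (k, g1 k))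
          , (l2.filter (fun k => !l1.contains k)).map (fun k => (k, g2 k))
          , (l1.filter (fun k => l2.contains k && !(g1 k == g2 k))).map
              (fun k => (k, [g1 k, g2 k])) ) := by
  intro l1
  induction l1 with
  | nil =>
    intro l2 _ _
    simp [envMerge]
  | cons k1 t1 ih1 =>
    intro l2 hp1 hp2
    have hk1t : ∀ k ∈ t1, k1 < k := (List.pairwise_cons.mp hp1).1
    have hp1t : t1.Pairwise (fun a b => a < b) := (List.pairwise_cons.mp hp1).2
    induction l2 with
    | nil =>
      simp [envMerge]
    | cons k2 t2 ih2 =>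
      have hk2t : ∀ k ∈ t2, k2 < k := (List.pairwise_cons.mp hp2).1
      have hp2t : t2.Pairwise (fun a b => a < b) := (List.pairwise_cons.mp hp2).2
      simp only [List.map_cons]
      rcases lt_trichotomy k1 k2 with hlt | heq | hgt
      · -- k1 only in env_1 at this point
        rw [envMerge]
        rw [if_pos hlt]
        have hall : ∀ k ∈ k2 :: t2, k1 < k := by
          intro k hk
          rcases List.mem_cons.mp hk with h | h
          · exact h ▸ hlt
          · exact lt_trans hlt (hk2t k h)
        have hnot : k1 ∉ k2 :: t2 := fun hm => lt_irrefl k1 (hall k1 hm)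
        have := ih1 (k2 :: t2) hp1t hp2
        simp only [List.map_cons] at this
        rw [this]
        have hfe : List.filter (fun k => !(k1 :: t1).contains k) (k2 :: t2)
            = List.filter (fun k => !t1.contains k) (k2 :: t2) := by
          apply List.filter_congr
          intro k hk
          have hne : k ≠ k1 := (hall k hk).ne'
          simp [hne]
        have hn2 : ((k2 :: t2).contains k1) = false := by
          simp only [List.contains_eq_mem]
          exact decide_eq_false hnot
        rw [List.filter_cons_of_pos (p := fun k => !(k2 :: t2).contains k)
              (by show (!(k2 :: t2).contains k1) = true; rw [hn2]; rfl),
            List.filter_cons_of_neg (p := fun k => (k2 :: t2).contains k && !(g1 k == g2 k))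
              (by show ¬((k2 :: t2).contains k1 && !(g1 k1 == g2 k1)) = true; rw [hn2]; simp),
            hfe, List.map_cons]
      · -- common key
        subst heq
        rw [envMerge]
        rw [if_neg (lt_irrefl k1), if_neg (lt_irrefl k1)]
        have := ih1 t2 hp1t hp2t
        rw [this]
        have hf1 : t1.filter (fun k => !(k1 :: t2).contains k)
            = t1.filter (fun k => !t2.contains k) := by
          apply List.filter_congr
          intro k hk
          have hne : k ≠ k1 := (hk1t k hk).ne'
          simp [hne]
        have hf2 : t2.filter (fun k => !(k1 :: t1).contains k)
            = t2.filter (fun k => !t1.contains k) := by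
          apply List.filter_congr
          intro k hk
          have hne : k ≠ k1 := (hk2t k hk).ne'
          simp [hne]
        have hf3 : t1.filter (fun k => (k1 :: t2).contains k && !(g1 k == g2 k))
            = t1.filter (fun k => t2.contains k && !(g1 k == g2 k)) := by
          apply List.filter_congr
          intro k hk
          have hne : k ≠ k1 := (hk1t k hk).ne'
          simp [hne]
        rw [List.filter_cons_of_neg (p := fun k => !(k1 :: t2).contains k)
              (by show ¬(!(k1 :: t2).contains k1) = true; simp),
            List.filter_cons_of_neg (p := fun k => !(k1 :: t1).contains k)
              (by show ¬(!(k1 :: t1).contains k1) = true; simp),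
            hf1, hf2]
        by_cases hv : g1 k1 = g2 k1
        · rw [if_neg (by simpa using hv),
              List.filter_cons_of_neg (p := fun k => (k1 :: t2).contains k && !(g1 k == g2 k))
                (by show ¬((k1 :: t2).contains k1 && !(g1 k1 == g2 k1)) = true; simp [hv]),
              hf3]
        · rw [if_pos hv,
              List.filter_cons_of_pos (p := fun k => (k1 :: t2).contains k && !(g1 k == g2 k))
                (by show ((k1 :: t2).contains k1 && !(g1 k1 == g2 k1)) = true; simp [hv]),
              hf3, List.map_cons]
      · -- k2 only in env_2 at this point
        rw [envMerge]
        rw [if_neg (lt_asymm hgt), if_pos hgt]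
        have hall : ∀ k ∈ k1 :: t1, k2 < k := by
          intro k hk
          rcases List.mem_cons.mp hk with h | h
          · exact h ▸ hgt
          · exact lt_trans hgt (hk1t k h)
        have hnot : k2 ∉ k1 :: t1 := fun hm => lt_irrefl k2 (hall k2 hm)
        have := ih2 hp2t
        simp only [List.map_cons] at this
        rw [this]
        have hf1 : (k1 :: t1).filter (fun k => !(k2 :: t2).contains k)
            = (k1 :: t1).filter (fun k => !t2.contains k) := by
          apply List.filter_congr
          intro k hk
          have hne : k ≠ k2 := (hall k hk).ne'
          simp [hne]
        have hf3 : (k1 :: t1).filter (fun k => (k2 :: t2).contains k && !(g1 k == g2 k))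
            = (k1 :: t1).filter (fun k => t2.contains k && !(g1 k == g2 k)) := by
          apply List.filter_congr
          intro k hk
          have hne : k ≠ k2 := (hall k hk).ne'
          simp [hne]
        have hn1 : ((k1 :: t1).contains k2) = false := by
          simp only [List.contains_eq_mem]
          exact decide_eq_false hnot
        rw [List.filter_cons_of_pos (p := fun k => !(k1 :: t1).contains k)
              (by show (!(k1 :: t1).contains k2) = true; rw [hn1]; rfl),
            hf1, hf3, List.map_cons]

-- sorting a dict's items by key is mapping the sorted key list back through the dict
theorem sorted_items_eq (d : PySem.Dict String String) (hnd : d.keys.Nodup) :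
    PySem.List.sorted d.items (fun kv => kv.1) false
      = (PySem.List.sorted d.keys (fun k => k) false).map (fun k => (k, d.getD k "")) := by
  set ks := PySem.List.sorted d.keys (fun k => k) false with hks
  have hperm_ks : ks.Perm d.keys := PySem.List.sorted_perm d.keys (fun k => k) false
  have hmap_items : d.items.map (fun kv => (kv.1, d.getD kv.1 "")) = d.items := by
    conv_rhs => rw [← List.map_id d.items]
    apply List.map_congr_left
    rintro ⟨a, b⟩ hp
    have : d.get? a = some b := PySem.Dict.get?_of_mem_items d hp hnd
    simp [PySem.Dict.getD, this]
  apply PySem.List.sorted_eq_of_perm_of_pairwise_lt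
  · have h1 : ks.map (fun k => (k, d.getD k "")) |>.Perm (d.keys.map (fun k => (k, d.getD k ""))) :=
      hperm_ks.map _
    have h2 : d.keys.map (fun k => (k, d.getD k "")) = d.items := by
      show (d.items.map Prod.fst).map (fun k => (k, d.getD k "")) = d.items
      rw [List.map_map]
      exact hmap_items
    rw [h2] at h1
    exact h1
  · have hnds : ks.Nodup := hperm_ks.nodup_iff.mpr hnd
    have hps : ks.Pairwise (fun a b : String => a ≤ b) :=
      PySem.List.sorted_pairwise d.keys (fun k => k)
    have hlt : ks.Pairwise (fun a b : String => a < b) :=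
      (hps.and hnds).imp (fun h => lt_of_le_of_ne h.1 h.2)
    rw [List.pairwise_map]
    exact hlt

-- ===== VERDICT (by name: the statement is the Claim_ definition above) =====
theorem env_diff_spec : Claim_equal_env_diff := by
  intro env_1 env_2 _
  unfold Spec_env_diff env_diff env_diff_alt
  simp only []
  set d1 := PySem.Dict.ofList env_1 with hd1
  set d2 := PySem.Dict.ofList env_2 with hd2
  have hnd1 : d1.keys.Nodup := PySem.Dict.nodup_keys_ofList env_1
  have hnd2 : d2.keys.Nodup := PySem.Dict.nodup_keys_ofList env_2
  set ks1 := PySem.List.sorted d1.keys (fun k => k) false with hks1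
  set ks2 := PySem.List.sorted d2.keys (fun k => k) false with hks2
  have hperm1 : ks1.Perm d1.keys := PySem.List.sorted_perm d1.keys (fun k => k) false
  have hperm2 : ks2.Perm d2.keys := PySem.List.sorted_perm d2.keys (fun k => k) false
  have hndk1 : ks1.Nodup := hperm1.nodup_iff.mpr hnd1
  have hndk2 : ks2.Nodup := hperm2.nodup_iff.mpr hnd2
  have hlt1 : ks1.Pairwise (fun a b : String => a < b) :=
    ((PySem.List.sorted_pairwise d1.keys (fun k => k)).and hndk1).imp
      (fun h => lt_of_le_of_ne h.1 h.2)
  have hlt2 : ks2.Pairwise (fun a b : String => a < b) :=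
    ((PySem.List.sorted_pairwise d2.keys (fun k => k)).and hndk2).imp
      (fun h => lt_of_le_of_ne h.1 h.2)
  -- membership in the sorted key lists is dict containment
  have hcont1 : ∀ k, ks1.contains k = d1.contains k := by
    intro k
    rw [PySem.Dict.contains_eq_decide_mem_keys]
    simp only [List.contains_eq_mem]
    rw [decide_eq_decide]
    rw [hks1, PySem.List.mem_sorted]
  have hcont2 : ∀ k, ks2.contains k = d2.contains k := by
    intro k
    rw [PySem.Dict.contains_eq_decide_mem_keys]
    simp only [List.contains_eq_mem]
    rw [decide_eq_decide]
    rw [hks2, PySem.List.mem_sorted]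
  -- A's side
  have hempS : ∀ k ∈ ks1, (PySem.Dict.empty : PySem.Dict String String).contains k = false := by
    intro k _; simp [PySem.Dict.contains_empty]
  have hempC : ∀ k ∈ ks1, (PySem.Dict.empty : PySem.Dict String (List String)).contains k = false := by
    intro k _; simp [PySem.Dict.contains_empty]
  obtain ⟨h11, h12⟩ := loop1_char d1 d2 ks1 PySem.Dict.empty PySem.Dict.empty hndk1 hempS hempC
  set r1 := ks1.foldl (envStep1 d1 d2) (PySem.Dict.empty, PySem.Dict.empty) with hr1
  have hckeys : r1.2.keys = ks1.filter (fun k => d2.contains k && !(d1.getD k "" == d2.getD k "")) := by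
    show r1.2.items.map Prod.fst = _
    rw [h12]
    simp [PySem.Dict.empty, Function.comp_def]
  have hcnd : r1.2.keys.Nodup := by
    rw [hckeys]; exact hndk1.filter _
  have hcg : ∀ k ∈ ks2, d1.contains k = true → d2.getD k "" ≠ d1.getD k "" →
      r1.2.get? k = some [d1.getD k "", d2.getD k ""] := by
    intro k _ h1 hv
    apply PySem.Dict.get?_of_mem_items _ _ hcnd
    rw [h12]
    have hk1 : k ∈ ks1 := by
      rw [hks1, PySem.List.mem_sorted]
      exact (PySem.Dict.contains_iff_mem_keys d1 k).mp h1
    rename_i hk2s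
    have h2 : d2.contains k = true := by
      apply (PySem.Dict.contains_iff_mem_keys d2 k).mpr
      rw [hks2, PySem.List.mem_sorted] at hk2s
      exact hk2s
    have hv' : ¬ (d1.getD k "" = d2.getD k "") := fun e => hv e.symm
    simp only [List.mem_append, List.mem_map, List.mem_filter]
    right
    exact ⟨k, ⟨hk1, by simp [h2, hv']⟩, rfl⟩
  have hempS2 : ∀ k ∈ ks2, (PySem.Dict.empty : PySem.Dict String String).contains k = false := by
    intro k _; simp [PySem.Dict.contains_empty]
  obtain ⟨h21, h22⟩ := loop2_char d1 d2 ks2 PySem.Dict.empty r1.2 hndk2 hempS2 hcnd hcg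
  -- B's side: the sorted item lists are the sorted key lists mapped through the dicts
  have hs1 : PySem.List.sorted d1.items (fun kv => kv.1) false
      = ks1.map (fun k => (k, d1.getD k "")) := sorted_items_eq d1 hnd1
  have hs2 : PySem.List.sorted d2.items (fun kv => kv.1) false
      = ks2.map (fun k => (k, d2.getD k "")) := sorted_items_eq d2 hnd2
  rw [hs1, hs2, merge_char (fun k => d1.getD k "") (fun k => d2.getD k "") ks1 ks2 hlt1 hlt2]
  -- now both sides are the filtered/mapped key lists
  refine Prod.ext ?_ (Prod.ext ?_ ?_)
  · show r1.1.items = _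
    rw [h11, show (PySem.Dict.empty : PySem.Dict String String).items = [] from rfl,
        List.nil_append]
    exact congrArg _ (List.filter_congr (fun k _ => by simp only [hcont2 k])).symm
  · show (ks2.foldl (envStep2 d1 d2) (PySem.Dict.empty, r1.2)).1.items = _
    rw [h21, show (PySem.Dict.empty : PySem.Dict String String).items = [] from rfl,
        List.nil_append]
    exact congrArg _ (List.filter_congr (fun k _ => by simp only [hcont1 k])).symm
  · show (ks2.foldl (envStep2 d1 d2) (PySem.Dict.empty, r1.2)).2.items = _
    rw [h22, h12, show (PySem.Dict.empty : PySem.Dict String (List String)).items = [] from rfl,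
        List.nil_append]
    exact congrArg _ (List.filter_congr (fun k _ => by simp only [hcont2 k])).symm
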